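-- pv_equiv track=rewrite | github.com/runzedong/Leetcode_record | Python/3sum_smaller.py | threesum_small
-- ===== SOURCE A (Python) =====
-- def threesum_small(nums,target):
-- 	nums.sort()
-- 	counter=0
-- 	length=len(nums)
-- 	for i in range(length-2):
-- 		l=i+1
-- 		r=length-1
-- 		while l<r:
-- 			sum_three=nums[i]+nums[l]+nums[r]
-- 			if sum_three<target:
-- 				counter+=(r-l)
-- 				l+=1
-- 			else:
-- 				r-=1
-- 	return counter
-- ===== SOURCE B (Python) =====
-- def threesum_small(nums, target):
--     nums.sort()  # kept so the caller-visible in-place mutation matches A's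
--     count = 0
--     n = len(nums)
--     for i in range(n):
--         for j in range(i + 1, n):
--             for k in range(j + 1, n):
--                 if nums[i] + nums[j] + nums[k] < target:
--                     count += 1
--     return count
-- ===== Notes on version B (the rewrite author's own statement) =====
-- stated objective: simpler
-- what changed: Replaces the two-pointer sweep with its counter += (r-l) shortcut by a plain enumeration of all index triples i<j<k, counting each triple whose sum is below target; nums.sort() is kept only to preserve the in-place mutation of the argument.
import Mathlib
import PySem

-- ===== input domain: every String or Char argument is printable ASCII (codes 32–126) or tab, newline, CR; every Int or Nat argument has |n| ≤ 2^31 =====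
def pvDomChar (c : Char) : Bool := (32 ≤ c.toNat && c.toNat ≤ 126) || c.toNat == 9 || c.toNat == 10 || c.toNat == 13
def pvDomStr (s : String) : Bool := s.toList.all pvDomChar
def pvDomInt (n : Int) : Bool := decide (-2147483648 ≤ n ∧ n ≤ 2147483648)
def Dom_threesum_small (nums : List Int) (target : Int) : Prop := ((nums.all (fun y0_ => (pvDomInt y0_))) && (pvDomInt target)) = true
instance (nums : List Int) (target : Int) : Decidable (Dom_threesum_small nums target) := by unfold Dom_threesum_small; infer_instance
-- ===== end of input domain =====

-- B replaces A's two-pointer sweep by plain enumeration of all triples i<j<k (simpler, not faster);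
-- both A and B sort the argument in place (caller-visible mutation identical); equivalence here is about the return value.

-- ===== PORT A =====
-- the 'while l<r' loop of A, recursing on the shrinking window r-l
def threesumInnerA (s : List Int) (target i : Int) (l r : Int) (counter : Int) : Int :=
  if _h : l < r then
    if PySem.List.pyGetD s i 0 + PySem.List.pyGetD s l 0 + PySem.List.pyGetD s r 0 < target then
      threesumInnerA s target i (l + 1) r (counter + (r - l))
    else
      threesumInnerA s target i l (r - 1) counter
  else counter
termination_by (r - l).toNat
decreasing_by all_goals omega

def threesum_small (nums : List Int) (target : Int) : Int :=
  let s := PySem.List.sorted nums (fun x => x) false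
  let length : Int := s.length
  (PySem.List.pyRange 0 (length - 2) 1).foldl
    (fun counter i => threesumInnerA s target i (i + 1) (length - 1) counter) 0

-- ===== PORT B =====
def threesum_small_alt (nums : List Int) (target : Int) : Int :=
  let s := PySem.List.sorted nums (fun x => x) false
  let n : Int := s.length
  (PySem.List.pyRange 0 n 1).foldl (fun c i =>
    (PySem.List.pyRange (i + 1) n 1).foldl (fun c j =>
      (PySem.List.pyRange (j + 1) n 1).foldl (fun c k =>
        if PySem.List.pyGetD s i 0 + PySem.List.pyGetD s j 0 + PySem.List.pyGetD s k 0 < target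
        then c + 1 else c) c) c) 0

-- ===== PRECONDITION & SPEC =====
def Spec_threesum_small (nums : List Int) (target : Int) (out : Int) : Prop := out = threesum_small_alt nums target
instance (nums : List Int) (target : Int) (out : Int) : Decidable (Spec_threesum_small nums target out) := by unfold Spec_threesum_small; infer_instance

-- ===== CLAIM (what is proved, stated in full; the proofs are below) =====
def Claim_equal_threesum_small : Prop := ∀ (nums : List Int) (target : Int), Dom_threesum_small nums target → Spec_threesum_small nums target (threesum_small nums target)

-- ===== LEMMAS AND PROOFS =====

-- number of pairs (j,k), l ≤ j < k ≤ r, whose triple sum with index i is below target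
def pairCount (s : List Int) (target : Int) (i l r : Nat) : Int :=
  ∑ j ∈ Finset.Ico l r, ∑ k ∈ Finset.Ico (j + 1) (r + 1),
    (if s.getD i 0 + s.getD j 0 + s.getD k 0 < target then (1 : Int) else 0)

lemma pairCount_step_lo (s : List Int) (target : Int) (i l r : Nat) (hlr : l < r)
    (hall : ∀ k, l < k → k ≤ r → s.getD i 0 + s.getD l 0 + s.getD k 0 < target) :
    pairCount s target i l r = ((r : Int) - (l : Int)) + pairCount s target i (l + 1) r := by
  unfold pairCount
  rw [Finset.sum_eq_sum_Ico_succ_bot hlr]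
  have h1 : ∑ k ∈ Finset.Ico (l + 1) (r + 1),
      (if s.getD i 0 + s.getD l 0 + s.getD k 0 < target then (1 : Int) else 0)
      = (r : Int) - (l : Int) := by
    have hone : ∀ k ∈ Finset.Ico (l + 1) (r + 1),
        (if s.getD i 0 + s.getD l 0 + s.getD k 0 < target then (1 : Int) else 0) = 1 := by
      intro k hk
      rw [Finset.mem_Ico] at hk
      exact if_pos (hall k (by omega) (by omega))
    rw [Finset.sum_congr rfl hone, Finset.sum_const, Nat.card_Ico, nsmul_eq_mul, mul_one]
    push_cast
    omega
  rw [h1]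

lemma pairCount_step_hi (s : List Int) (target : Int) (i l r : Nat) (hlr : l < r)
    (hall : ∀ j, l ≤ j → j < r → ¬ s.getD i 0 + s.getD j 0 + s.getD r 0 < target) :
    pairCount s target i l r = pairCount s target i l (r - 1) := by
  unfold pairCount
  have hr1 : r - 1 + 1 = r := by omega
  rw [hr1]
  have step : ∀ j ∈ Finset.Ico l r,
      (∑ k ∈ Finset.Ico (j + 1) (r + 1),
        (if s.getD i 0 + s.getD j 0 + s.getD k 0 < target then (1 : Int) else 0))
      = ∑ k ∈ Finset.Ico (j + 1) r,
        (if s.getD i 0 + s.getD j 0 + s.getD k 0 < target then (1 : Int) else 0) := by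
    intro j hj
    rw [Finset.mem_Ico] at hj
    rw [Finset.sum_Ico_succ_top (by omega), if_neg (hall j hj.1 hj.2)]
    ring
  rw [Finset.sum_congr rfl step]
  rw [show r = (r - 1) + 1 by omega, Finset.sum_Ico_succ_top (by omega)]
  simp [show r - 1 + 1 = r by omega]

-- the two-pointer loop counts exactly the qualifying pairs in its window
lemma innerA_eq (s : List Int) (target : Int)
    (hmono : ∀ p q : Nat, p ≤ q → q < s.length → s.getD p 0 ≤ s.getD q 0) :
    ∀ d i l r : Nat, r - l ≤ d → r < s.length → ∀ acc : Int,
      threesumInnerA s target (i : Int) (l : Int) (r : Int) acc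
        = acc + pairCount s target i l r := by
  intro d
  induction d with
  | zero =>
    intro i l r hd hr acc
    rw [threesumInnerA]
    rw [dif_neg (by omega)]
    unfold pairCount
    rw [Finset.Ico_eq_empty (by omega)]
    simp
  | succ d ih =>
    intro i l r hd hr acc
    by_cases hlr : l < r
    · rw [threesumInnerA, dif_pos (by exact_mod_cast hlr)]
      simp only [PySem.List.pyGetD_natCast]
      by_cases hc : s.getD i 0 + s.getD l 0 + s.getD r 0 < target
      · rw [if_pos hc]
        have hcast : ((l : Int) + 1) = ((l + 1 : Nat) : Int) := by push_cast; ring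
        rw [hcast, ih i (l + 1) r (by omega) hr]
        rw [pairCount_step_lo s target i l r hlr (fun k hk1 hk2 => by
          have := hmono k r hk2 hr
          omega)]
        ring
      · rw [if_neg hc]
        have hcast : ((r : Int) - 1) = ((r - 1 : Nat) : Int) := by omega
        rw [hcast, ih i l (r - 1) (by omega) (by omega)]
        rw [pairCount_step_hi s target i l r hlr (fun j hj1 hj2 hlt => by
          have := hmono l j hj1 (by omega)
          omega)]
    · rw [threesumInnerA, dif_neg (by exact_mod_cast hlr)]
      unfold pairCount
      rw [Finset.Ico_eq_empty (by omega)]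
      simp

-- generic: a foldl over range(a, b) whose step adds f i is the Ico-sum of f
lemma foldl_range_eq_sum (f : Nat → Int) (step : Int → Int → Int)
    : ∀ (a b : Nat) (c : Int),
    (∀ (c : Int) (i : Nat), a ≤ i → i < b → step c (i : Int) = c + f i) →
      (PySem.List.pyRange (a : Int) (b : Int) 1).foldl step c
        = c + ∑ i ∈ Finset.Ico a b, f i := by
  intro a b
  by_cases hab : a ≤ b
  · obtain ⟨d, rfl⟩ := Nat.exists_eq_add_of_le hab
    clear hab
    induction d generalizing a with
    | zero =>
      intro c _
      rw [PySem.List.pyRange_one_eq_nil (by omega)]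
      simp
    | succ d ih =>
      intro c hstep
      rw [PySem.List.pyRange_one_cons (by exact_mod_cast Nat.lt_add_of_pos_right (Nat.succ_pos d))]
      simp only [List.foldl_cons]
      rw [hstep c a (le_refl a) (by omega)]
      have hcast : ((a : Int) + 1) = ((a + 1 : Nat) : Int) := by push_cast; ring
      have hcast2 : ((a + (d + 1) : Nat) : Int) = (((a + 1) + d : Nat) : Int) := by push_cast; ring
      rw [hcast, hcast2, ih (a + 1) (c + f a) (fun c i h1 h2 => hstep c i (by omega) (by omega))]
      rw [Finset.sum_eq_sum_Ico_succ_bot (show a < a + (d + 1) by omega) f]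
      rw [show a + (d + 1) = (a + 1) + d by omega]
      ring
  · intro c _
    rw [PySem.List.pyRange_one_eq_nil (by exact_mod_cast Nat.le_of_not_lt (by omega))]
    rw [Finset.Ico_eq_empty (by omega)]
    simp

-- B's triple loop as a triple Ico-sum
lemma altB_eq_sum (s : List Int) (target : Int) (n : Nat) :
    (PySem.List.pyRange 0 (n : Int) 1).foldl (fun c i =>
      (PySem.List.pyRange (i + 1) (n : Int) 1).foldl (fun c j =>
        (PySem.List.pyRange (j + 1) (n : Int) 1).foldl (fun c k =>
          if PySem.List.pyGetD s i 0 + PySem.List.pyGetD s j 0 + PySem.List.pyGetD s k 0 < target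
          then c + 1 else c) c) c) 0
    = ∑ i ∈ Finset.Ico 0 n, ∑ j ∈ Finset.Ico (i + 1) n, ∑ k ∈ Finset.Ico (j + 1) n,
        (if s.getD i 0 + s.getD j 0 + s.getD k 0 < target then (1 : Int) else 0) := by
  refine (foldl_range_eq_sum
      (fun i => ∑ j ∈ Finset.Ico (i + 1) n, ∑ k ∈ Finset.Ico (j + 1) n,
        (if s.getD i 0 + s.getD j 0 + s.getD k 0 < target then (1 : Int) else 0))
      _ 0 n 0 ?_).trans (zero_add _)
  intro c i _ hi
  have hcast : ((i : Int) + 1) = ((i + 1 : Nat) : Int) := by push_cast; ring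
  rw [hcast, foldl_range_eq_sum
      (fun j => ∑ k ∈ Finset.Ico (j + 1) n,
        (if s.getD i 0 + s.getD j 0 + s.getD k 0 < target then (1 : Int) else 0)) _ (i+1) n c ?_]
  intro c j _ hj
  have hcast2 : ((j : Int) + 1) = ((j + 1 : Nat) : Int) := by push_cast; ring
  rw [hcast2, foldl_range_eq_sum
      (fun k => if s.getD i 0 + s.getD j 0 + s.getD k 0 < target then (1 : Int) else 0) _ (j+1) n c ?_]
  intro c k _ hk
  simp only [PySem.List.pyGetD_natCast]
  split_ifs <;> ring

-- ===== VERDICT (by name: the statement is the Claim_ definition above) =====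
theorem threesum_small_spec : Claim_equal_threesum_small := by
  intro nums target _
  unfold Spec_threesum_small threesum_small threesum_small_alt
  set s := PySem.List.sorted nums (fun x => x) false with hs
  set n : Nat := s.length with hn
  have hlen : ((s.length : Int)) = (n : Int) := by rw [hn]
  simp only [← hn]
  have hmono : ∀ p q : Nat, p ≤ q → q < s.length → s.getD p 0 ≤ s.getD q 0 := by
    intro p q hpq hq
    rw [List.getD_eq_getElem s 0 (by omega), List.getD_eq_getElem s 0 hq]
    exact PySem.List.sorted_id_getElem_mono nums hpq (by rw [← hs] at *; omega)
  rw [altB_eq_sum s target n]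
  by_cases h3 : 3 ≤ n
  · -- A's outer loop
    have hc2 : ((n : Int) - 2) = ((n - 2 : Nat) : Int) := by omega
    rw [hc2]
    refine (foldl_range_eq_sum (fun i => pairCount s target i (i + 1) (n - 1))
        _ 0 (n - 2) 0 ?hstep).trans ?rest
    case rest => -- sums agree
      rw [zero_add]
      rw [show Finset.Ico 0 n = Finset.Ico 0 (n-2) ∪ Finset.Ico (n-2) n by
        rw [Finset.Ico_union_Ico_eq_Ico (by omega) (by omega)]]
      rw [Finset.sum_union (by
        apply Finset.Ico_disjoint_Ico_consecutive)]
      have hzero : ∑ i ∈ Finset.Ico (n-2) n, ∑ j ∈ Finset.Ico (i + 1) n, ∑ k ∈ Finset.Ico (j + 1) n,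
          (if s.getD i 0 + s.getD j 0 + s.getD k 0 < target then (1 : Int) else 0) = 0 := by
        apply Finset.sum_eq_zero
        intro i hi
        rw [Finset.mem_Ico] at hi
        apply Finset.sum_eq_zero
        intro j hj
        rw [Finset.mem_Ico] at hj
        rw [Finset.Ico_eq_empty (by omega)]
        simp
      rw [hzero, add_zero]
      apply Finset.sum_congr rfl
      intro i hi
      rw [Finset.mem_Ico] at hi
      unfold pairCount
      rw [show (n - 1) + 1 = n by omega]
      rw [show Finset.Ico (i+1) n = Finset.Ico (i+1) (n-1) ∪ Finset.Ico (n-1) n by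
        rw [Finset.Ico_union_Ico_eq_Ico (by omega) (by omega)]]
      rw [Finset.sum_union (Finset.Ico_disjoint_Ico_consecutive _ _ _)]
      have hz2 : ∑ j ∈ Finset.Ico (n-1) n, ∑ k ∈ Finset.Ico (j + 1) n,
          (if s.getD i 0 + s.getD j 0 + s.getD k 0 < target then (1 : Int) else 0) = 0 := by
        apply Finset.sum_eq_zero
        intro j hj
        rw [Finset.mem_Ico] at hj
        rw [Finset.Ico_eq_empty (by omega)]
        simp
      rw [hz2, add_zero]
    case hstep =>
      intro c i _ hi
      have hcast : ((i : Int) + 1) = ((i + 1 : Nat) : Int) := by push_cast; ring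
      have hcast2 : ((n : Int) - 1) = ((n - 1 : Nat) : Int) := by omega
      rw [hcast, hcast2]
      exact innerA_eq s target hmono (n - 1) i (i + 1) (n - 1) (by omega) (by omega) c
  · -- n ≤ 2: A's range is empty and every triple sum is empty
    rw [PySem.List.pyRange_one_eq_nil (by omega)]
    simp only [List.foldl_nil]
    symm
    apply Finset.sum_eq_zero
    intro i hi
    rw [Finset.mem_Ico] at hi
    apply Finset.sum_eq_zero
    intro j hj
    rw [Finset.mem_Ico] at hj
    rw [Finset.Ico_eq_empty (by omega)]
    simp
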